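-- pv_equiv track=rewrite | github.com/Kirillova-Anastasia/ya-algorithm-training | 02_LinearSearch/Lecture.py | ShortWords
-- ===== SOURCE A (Python) =====
-- def ShortWords(seq):
--     if not seq:
--         return ''
--     minlen = len(seq[0])
--     for word in seq:
--         if len(word) < minlen:
--             minlen = len(word)
--     ans = []
--     for word in seq:
--         if len(word) == minlen:
--             ans.append(word)
--     return ' '.join(ans)
-- ===== SOURCE B (Python) =====
-- def ShortWords(seq):
--     best = None
--     ans = []
--     for word in seq:
--         n = len(word)
--         if best is None or n < best:
--             best = n
--             ans = [word]
--         elif n == best: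
--             ans.append(word)
--     return ' '.join(ans)
-- ===== Notes on version B (the rewrite author's own statement) =====
-- stated objective: alternative
-- what changed: Replaces A's two passes (min-length scan, then a collecting scan) with a single traversal that keeps the running minimum and resets the accumulator whenever a strictly shorter word appears.
import Mathlib
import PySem

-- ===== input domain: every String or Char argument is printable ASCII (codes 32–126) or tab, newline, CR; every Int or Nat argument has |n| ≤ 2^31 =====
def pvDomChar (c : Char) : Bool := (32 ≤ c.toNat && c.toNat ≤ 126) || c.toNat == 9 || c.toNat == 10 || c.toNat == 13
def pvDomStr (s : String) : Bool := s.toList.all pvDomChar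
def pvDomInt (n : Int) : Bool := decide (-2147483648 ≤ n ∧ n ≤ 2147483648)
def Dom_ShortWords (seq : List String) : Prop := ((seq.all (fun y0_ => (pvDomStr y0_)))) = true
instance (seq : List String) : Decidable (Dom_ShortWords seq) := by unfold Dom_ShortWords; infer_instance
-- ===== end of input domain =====

-- B replaces A's two passes (min scan, then collect) with one pass that resets the
-- accumulator on a strictly shorter word; objective: alternative (same cost, single traversal).

-- ===== PORT A =====
def ShortWords (seq : List String) : String :=
  match seq with
  | [] => ""
  | w0 :: _ =>
    let minlen := seq.foldl (fun m w => if PySem.Str.len w < m then PySem.Str.len w else m)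
      (PySem.Str.len w0)
    let ans := seq.foldl (fun acc w => if PySem.Str.len w = minlen then acc ++ [w] else acc)
      ([] : List String)
    PySem.Str.join " " ans

-- ===== PORT B =====
def ShortWords_alt (seq : List String) : String :=
  let st := seq.foldl (fun (st : Option Int × List String) w =>
      let n := PySem.Str.len w
      match st.1 with
      | none => (some n, [w])
      | some b =>
        if n < b then (some n, [w])
        else if n = b then (some b, st.2 ++ [w])
        else st) ((none : Option Int), ([] : List String))
  PySem.Str.join " " st.2

-- ===== PRECONDITION & SPEC =====
def Spec_ShortWords (seq : List String) (out : String) : Prop := out = ShortWords_alt seq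
instance (seq : List String) (out : String) : Decidable (Spec_ShortWords seq out) := by unfold Spec_ShortWords; infer_instance

-- ===== CLAIM (what is proved, stated in full; the proofs are below) =====
def Claim_equal_ShortWords : Prop := ∀ (seq : List String), Dom_ShortWords seq → Spec_ShortWords seq (ShortWords seq)

-- ===== LEMMAS AND PROOFS =====

-- A's first loop (running minimum, in A's "if l < m" form)
def pvMfold (b : Int) (t : List String) : Int :=
  t.foldl (fun m w => if PySem.Str.len w < m then PySem.Str.len w else m) b

-- B's loop body (named, for the lemmas)
def pvStep (st : Option Int × List String) (w : String) : Option Int × List String :=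
  let n := PySem.Str.len w
  match st.1 with
  | none => (some n, [w])
  | some b =>
    if n < b then (some n, [w])
    else if n = b then (some b, st.2 ++ [w])
    else st

lemma pvMfold_le (t : List String) : ∀ b : Int, pvMfold b t ≤ b := by
  induction t with
  | nil => intro b; simp [pvMfold]
  | cons w t ih =>
    intro b
    show pvMfold (if PySem.Str.len w < b then PySem.Str.len w else b) t ≤ b
    split_ifs with h
    · exact le_trans (ih _) (le_of_lt h)
    · exact ih b

lemma pvLoop_snd (t : List String) : ∀ (b : Int) (acc : List String),
    (t.foldl pvStep (some b, acc)).2 =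
      (if pvMfold b t < b then [] else acc) ++
        t.filter (fun w => decide (PySem.Str.len w = pvMfold b t)) := by
  induction t with
  | nil => intro b acc; simp [pvMfold]
  | cons w t ih =>
    intro b acc
    have hstep : List.foldl pvStep (some b, acc) (w :: t) =
        List.foldl pvStep (pvStep (some b, acc) w) t := rfl
    have hm : pvMfold b (w :: t) =
        pvMfold (if PySem.Str.len w < b then PySem.Str.len w else b) t := rfl
    rw [hstep, hm]
    by_cases h1 : PySem.Str.len w < b
    · -- strictly shorter: reset the accumulator
      have hstep' : pvStep (some b, acc) w = (some (PySem.Str.len w), [w]) := by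
        show (if PySem.Str.len w < b then (some (PySem.Str.len w), [w])
              else if PySem.Str.len w = b then (some b, acc ++ [w]) else (some b, acc)) = _
        rw [if_pos h1]
      rw [hstep', ih]
      have hle := pvMfold_le t (PySem.Str.len w)
      rw [if_pos h1]
      have hMb : pvMfold (PySem.Str.len w) t < b := lt_of_le_of_lt hle h1
      rw [if_pos hMb, List.filter_cons]
      by_cases h2 : pvMfold (PySem.Str.len w) t < PySem.Str.len w
      · rw [if_pos h2]
        have hne : ¬ (PySem.Str.len w = pvMfold (PySem.Str.len w) t) := by omega
        have hd : decide (PySem.Str.len w = pvMfold (PySem.Str.len w) t) = false := by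
          simpa using hne
        rw [hd]
        simp
      · have heq : PySem.Str.len w = pvMfold (PySem.Str.len w) t := by omega
        have hd : decide (PySem.Str.len w = pvMfold (PySem.Str.len w) t) = true := by
          simpa using heq
        rw [if_neg h2, hd]
        simp
    · by_cases h2 : PySem.Str.len w = b
      · -- equal length: append
        have hstep' : pvStep (some b, acc) w = (some b, acc ++ [w]) := by
          show (if PySem.Str.len w < b then (some (PySem.Str.len w), [w])
                else if PySem.Str.len w = b then (some b, acc ++ [w]) else (some b, acc)) = _
          rw [if_neg h1, if_pos h2]
        rw [hstep', ih, if_neg h1, List.filter_cons]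
        have hle := pvMfold_le t b
        by_cases h3 : pvMfold b t < b
        · rw [if_pos h3, if_pos h3]
          have hne : ¬ (PySem.Str.len w = pvMfold b t) := by omega
          have hd : decide (PySem.Str.len w = pvMfold b t) = false := by simpa using hne
          rw [hd]
          simp
        · have heq : PySem.Str.len w = pvMfold b t := by omega
          have hd : decide (PySem.Str.len w = pvMfold b t) = true := by simpa using heq
          rw [if_neg h3, if_neg h3, hd]
          simp
      · -- longer: skip
        have hstep' : pvStep (some b, acc) w = (some b, acc) := by
          show (if PySem.Str.len w < b then (some (PySem.Str.len w), [w])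
                else if PySem.Str.len w = b then (some b, acc ++ [w]) else (some b, acc)) = _
          rw [if_neg h1, if_neg h2]
        rw [hstep', ih, if_neg h1, List.filter_cons]
        have hle := pvMfold_le t b
        have hne : ¬ (PySem.Str.len w = pvMfold b t) := by omega
        have hd : decide (PySem.Str.len w = pvMfold b t) = false := by simpa using hne
        rw [hd]
        simp

-- ===== VERDICT (by name: the statement is the Claim_ definition above) =====
theorem ShortWords_spec : Claim_equal_ShortWords := by
  intro seq _
  unfold Spec_ShortWords ShortWords ShortWords_alt
  match seq with
  | [] => rfl
  | w :: t =>
    simp only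
    congr 1
    have hmin : (List.foldl (fun m x => if PySem.Str.len x < m then PySem.Str.len x else m)
        (PySem.Str.len w) (w :: t)) = pvMfold (PySem.Str.len w) t := by
      show pvMfold (if PySem.Str.len w < PySem.Str.len w then PySem.Str.len w else PySem.Str.len w) t
          = pvMfold (PySem.Str.len w) t
      simp
    rw [hmin, PySem.List.foldl_append_ite_eq_filter]
    have hB : (List.foldl pvStep ((none : Option Int), ([] : List String)) (w :: t)).2
        = (if pvMfold (PySem.Str.len w) t < PySem.Str.len w then [] else [w]) ++
            t.filter (fun x => decide (PySem.Str.len x = pvMfold (PySem.Str.len w) t)) := by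
      have h0 : List.foldl pvStep ((none : Option Int), ([] : List String)) (w :: t)
          = List.foldl pvStep (some (PySem.Str.len w), [w]) t := rfl
      rw [h0, pvLoop_snd]
    have hBfold : (List.foldl (fun (st : Option Int × List String) x =>
        match st.1 with
        | none => (some (PySem.Str.len x), [x])
        | some b =>
          if PySem.Str.len x < b then (some (PySem.Str.len x), [x])
          else if PySem.Str.len x = b then (some b, st.2 ++ [x])
          else st) ((none : Option Int), ([] : List String)) (w :: t)) =
        List.foldl pvStep ((none : Option Int), ([] : List String)) (w :: t) := rfl
    rw [hBfold, hB, List.filter_cons]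
    have hle := pvMfold_le t (PySem.Str.len w)
    by_cases h : pvMfold (PySem.Str.len w) t < PySem.Str.len w
    · rw [if_pos h]
      have hne : ¬ (PySem.Str.len w = pvMfold (PySem.Str.len w) t) := by omega
      have hd : decide (PySem.Str.len w = pvMfold (PySem.Str.len w) t) = false := by
        simpa using hne
      rw [hd]
      simp
    · have heq : PySem.Str.len w = pvMfold (PySem.Str.len w) t := by omega
      have hd : decide (PySem.Str.len w = pvMfold (PySem.Str.len w) t) = true := by
        simpa using heq
      rw [if_neg h, hd]
      simp
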